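-- pv_equiv track=rewrite | github.com/epilectrik/voynich | phases/PMS_prefix_material/prefix_role_analysis.py | segment_into_entries
-- ===== SOURCE A (Python) =====
-- from collections import Counter, defaultdict
-- from typing import Dict, List, Tuple, Set, Any
--
-- def segment_into_entries(words: List[Dict]) -> List[List[Dict]]:
--     """Segment corpus into entries using folio boundaries."""
--     by_folio = defaultdict(list)
--     for w in words:
--         by_folio[w['folio']].append(w)
--
--     entries = []
--     for folio in sorted(by_folio.keys()):
--         entries.append(by_folio[folio])
--
--     return entries
-- ===== SOURCE B (Python) =====
-- def segment_into_entries(words):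
--     """Segment corpus into entries using folio boundaries."""
--     folios = sorted({w['folio'] for w in words})
--     return [[w for w in words if w['folio'] == f] for f in folios]
-- ===== Notes on version B (the rewrite author's own statement) =====
-- stated objective: alternative
-- what changed: Replaced the defaultdict grouping pass plus key sort with a sorted set comprehension of folios and one filter pass per folio (no dict at all).
import Mathlib
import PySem

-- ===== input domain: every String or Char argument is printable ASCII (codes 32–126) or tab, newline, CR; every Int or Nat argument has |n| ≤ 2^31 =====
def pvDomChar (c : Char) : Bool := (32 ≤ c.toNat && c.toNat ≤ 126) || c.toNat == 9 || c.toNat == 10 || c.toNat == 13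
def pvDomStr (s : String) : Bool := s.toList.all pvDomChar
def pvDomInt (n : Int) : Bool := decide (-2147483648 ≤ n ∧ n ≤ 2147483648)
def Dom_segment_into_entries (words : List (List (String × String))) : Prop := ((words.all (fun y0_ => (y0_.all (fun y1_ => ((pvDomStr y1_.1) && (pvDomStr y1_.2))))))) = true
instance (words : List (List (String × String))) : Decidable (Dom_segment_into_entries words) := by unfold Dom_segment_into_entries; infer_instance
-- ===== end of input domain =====

-- B replaces A's defaultdict-grouping pass followed by a key sort with a sorted set of
-- folios and one filter pass per folio (objective: alternative decomposition, no dict).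

-- w['folio'] (first-match lookup in the word dict; "" never occurs inside Pre_, where the key exists)
def pvFolio (w : List (String × String)) : String := (PySem.Dict.mk w).getD "folio" ""

-- ===== PORT A =====
def segment_into_entries (words : List (List (String × String))) : List (List (List (String × String))) :=
  let by_folio := words.foldl (fun d w => d.modify (pvFolio w) [] (· ++ [w])) PySem.Dict.empty
  (PySem.List.sorted by_folio.keys (fun x => x) false).foldl
    (fun entries folio => entries ++ [by_folio.getD folio []]) []

-- ===== PORT B =====
def segment_into_entries_alt (words : List (List (String × String))) : List (List (List (String × String))) :=
  (PySem.List.sorted (PySem.Set.ofList (words.map pvFolio)) (fun x => x) false).map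
    (fun f => words.filter (fun w => pvFolio w == f))

-- ===== PRECONDITION & SPEC =====
-- Pre_ excludes exactly the inputs where some word lacks the 'folio' key: there the Python A
-- (and B alike) raises KeyError.
def Pre_segment_into_entries (words : List (List (String × String))) : Prop :=
  ∀ w ∈ words, "folio" ∈ w.map (·.1)
instance (words : List (List (String × String))) : Decidable (Pre_segment_into_entries words) := by unfold Pre_segment_into_entries; infer_instance
def pvWitness_segment_into_entries : (List (List (String × String))) :=
  [[("folio", "f1"), ("word", "daiin")], [("folio", "f2"), ("word", "chedy")], [("folio", "f1"), ("word", "ol")]]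

def Spec_segment_into_entries (words : List (List (String × String))) (out : List (List (List (String × String)))) : Prop := out = segment_into_entries_alt words
instance (words : List (List (String × String))) (out : List (List (List (String × String)))) : Decidable (Spec_segment_into_entries words out) := by unfold Spec_segment_into_entries; infer_instance

-- ===== CLAIM (what is proved, stated in full; the proofs are below) =====
def Claim_equal_segment_into_entries : Prop := ∀ (words : List (List (String × String))), Dom_segment_into_entries words → Pre_segment_into_entries words → Spec_segment_into_entries words (segment_into_entries words)

-- ===== LEMMAS AND PROOFS =====

-- A's grouping dict: its keys are the distinct folios in first-occurrence order.
theorem keys_by_folio (words : List (List (String × String))) :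
    (words.foldl (fun d w => d.modify (pvFolio w) [] (· ++ [w])) PySem.Dict.empty).keys
      = PySem.Set.ofList (words.map pvFolio) := by
  rw [PySem.Dict.keys_foldl_modify_key]
  simp [PySem.Dict.keys_empty, PySem.Set.update, PySem.Set.ofList_eq_foldl]

-- A's grouping dict at any folio f holds exactly the words whose folio is f, in order.
theorem getD_by_folio (words : List (List (String × String))) (f : String) :
    (words.foldl (fun d w => d.modify (pvFolio w) [] (· ++ [w])) PySem.Dict.empty).getD f []
      = words.filter (fun w => pvFolio w == f) := by
  have h := PySem.Dict.getD_foldl_modify_append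
    (l := words.map (fun w => (pvFolio w, w))) (d := PySem.Dict.empty) (c := f)
  rw [List.foldl_map] at h
  simp only [h, PySem.Dict.getD_empty, List.filter_map, List.map_map]
  simp [Function.comp_def]

-- ===== VERDICT (by name: the statement is the Claim_ definition above) =====
theorem segment_into_entries_spec : Claim_equal_segment_into_entries := by
  intro words _ _
  unfold Spec_segment_into_entries segment_into_entries segment_into_entries_alt
  dsimp only
  rw [keys_by_folio, PySem.List.foldl_append_singleton_eq_map]
  exact List.map_congr_left (fun f _ => getD_by_folio words f)
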